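-- pv_equiv track=rewrite | github.com/KAILAI-Y/PatentInsight | mywebapi/patent_api/views/keyword_networkx_views.py | limit_cooccurrences
-- ===== SOURCE A (Python) =====
-- from collections import defaultdict
-- import heapq
--
-- def limit_cooccurrences(cooccurrence, max_connections=5):
--     # 创建一个新的字典来存储限制后的共现关系
--     limited_cooccurrence = defaultdict(dict)
--
--     # 为每个词收集共现对
--     for (word1, word2), weight in cooccurrence.items():
--         limited_cooccurrence[word1][word2] = weight
--
--     # 限制每个词的共现对数量
--     for word, connections in limited_cooccurrence.items():
--         # 如果共现对的数量超过最大限制，则只保留权重最高的几个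
--         if len(connections) > max_connections:
--             top_connections = heapq.nlargest(
--                 max_connections, connections.items(), key=lambda x: x[1]
--             )
--             limited_cooccurrence[word] = dict(top_connections)
--
--     # 转换回原始格式
--     final_cooccurrence = {}
--     for word1, connections in limited_cooccurrence.items():
--         for word2, weight in connections.items():
--             final_cooccurrence[(word1, word2)] = weight
--
--     return final_cooccurrence
-- ===== SOURCE B (Python) =====
-- def limit_cooccurrences(cooccurrence, max_connections=5):
--     # one pass: group the pairs by first word, in encounter order
--     groups = {}
--     for (word1, word2), weight in cooccurrence.items():
--         groups.setdefault(word1, []).append((word2, weight))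
--
--     result = {}
--     for word1, pairs in groups.items():
--         if len(pairs) > max_connections:
--             # bounded insertion: keep a running top-`max_connections` list in
--             # descending-weight order (ties keep encounter order) instead of
--             # heap-selecting from the full collection afterwards
--             top = []
--             for item in pairs:
--                 i = 0
--                 while i < len(top) and top[i][1] >= item[1]:
--                     i += 1
--                 top.insert(i, item)
--                 del top[max_connections:]
--             pairs = top
--         for word2, weight in pairs:
--             result[(word1, word2)] = weight
--     return result
-- ===== Notes on version B (the rewrite author's own statement) =====
-- stated objective: alternative
-- what changed: Replaces A's three dict-of-dict passes with heapq.nlargest selection by a single grouping pass into lists plus a bounded-insertion top-k pass that maintains a running descending-weight list truncated to max_connections, so no heap and no nested dicts are built.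
import Mathlib
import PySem

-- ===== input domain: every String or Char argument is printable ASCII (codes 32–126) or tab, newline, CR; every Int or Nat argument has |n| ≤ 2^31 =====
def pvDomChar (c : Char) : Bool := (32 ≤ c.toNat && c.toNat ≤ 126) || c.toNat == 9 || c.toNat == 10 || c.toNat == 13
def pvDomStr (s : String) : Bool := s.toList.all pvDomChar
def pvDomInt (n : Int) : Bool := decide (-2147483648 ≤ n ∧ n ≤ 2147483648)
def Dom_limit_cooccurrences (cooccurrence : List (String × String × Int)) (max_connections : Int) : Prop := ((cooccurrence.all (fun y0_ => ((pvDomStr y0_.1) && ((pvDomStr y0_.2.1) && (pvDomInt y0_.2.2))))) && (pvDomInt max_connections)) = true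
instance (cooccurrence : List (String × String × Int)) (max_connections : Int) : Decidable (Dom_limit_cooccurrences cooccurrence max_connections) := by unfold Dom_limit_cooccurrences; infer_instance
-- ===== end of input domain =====

-- B replaces A's nested-dict passes + heapq.nlargest selection by one grouping pass into
-- lists and a bounded-insertion top-k pass (alternative algorithm, no speed claim).

-- ===== PORT A =====
-- the dict argument as the Python function receives it: the association list as a
-- Python dict (duplicate (word1, word2) keys collapse: last value wins, first position)
def limit_cooccurrences (cooccurrence : List (String × String × Int)) (max_connections : Int) : List (String × String × Int) :=
  let items := (PySem.Dict.ofList (cooccurrence.map (fun t => ((t.1, t.2.1), t.2.2)))).items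
  -- for (word1, word2), weight in cooccurrence.items(): limited_cooccurrence[word1][word2] = weight
  let limited : PySem.Dict String (PySem.Dict String Int) :=
    items.foldl
      (fun d p => d.insert p.1.1 ((d.getD p.1.1 PySem.Dict.empty).insert p.1.2 p.2))
      PySem.Dict.empty
  -- for word, connections in limited_cooccurrence.items(): if len(connections) > max_connections:
  --   limited_cooccurrence[word] = dict(heapq.nlargest(max_connections, connections.items(), key=lambda x: x[1]))
  -- (value overwritten in place; nlargest n with key = stable sort by key descending, first n, [] for n ≤ 0)
  let limited2 : PySem.Dict String (PySem.Dict String Int) :=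
    PySem.Dict.mk (limited.items.map (fun wc =>
      if max_connections < (wc.2.size : Int) then
        (wc.1, PySem.Dict.ofList ((PySem.List.sorted wc.2.items (fun x => x.2) true).take max_connections.toNat))
      else wc))
  -- final_cooccurrence[(word1, word2)] = weight
  let final : PySem.Dict (String × String) Int :=
    limited2.items.foldl
      (fun f wc => wc.2.items.foldl (fun f p => f.insert (wc.1, p.1) p.2) f)
      PySem.Dict.empty
  final.items.map (fun t => (t.1.1, t.1.2, t.2))

-- ===== PORT B =====
def limit_cooccurrences_alt (cooccurrence : List (String × String × Int)) (max_connections : Int) : List (String × String × Int) :=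
  let items := (PySem.Dict.ofList (cooccurrence.map (fun t => ((t.1, t.2.1), t.2.2)))).items
  -- groups.setdefault(word1, []).append((word2, weight))
  let groups : PySem.Dict String (List (String × Int)) :=
    items.foldl
      (fun g p => g.modify p.1.1 [] (fun l => l ++ [(p.1.2, p.2)]))
      PySem.Dict.empty
  -- for word1, pairs in groups.items(): bounded-insertion top-k when len(pairs) > max_connections
  -- (the while loop inserting before the first strictly-smaller weight is insertBy;
  --  'del top[max_connections:]' keeps the prefix top[:max_connections], i.e. slice)
  let result : PySem.Dict (String × String) Int :=
    groups.items.foldl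
      (fun r wg =>
        let pairs := if max_connections < (wg.2.length : Int) then
            wg.2.foldl (fun top it =>
              PySem.List.slice (PySem.List.insertBy (fun a b => decide (b.2 < a.2)) it top) none (some max_connections)) []
          else wg.2
        pairs.foldl (fun r p => r.insert (wg.1, p.1) p.2) r)
      PySem.Dict.empty
  result.items.map (fun t => (t.1.1, t.1.2, t.2))

-- ===== PRECONDITION & SPEC =====
def Spec_limit_cooccurrences (cooccurrence : List (String × String × Int)) (max_connections : Int) (out : List (String × String × Int)) : Prop := out = limit_cooccurrences_alt cooccurrence max_connections
instance (cooccurrence : List (String × String × Int)) (max_connections : Int) (out : List (String × String × Int)) : Decidable (Spec_limit_cooccurrences cooccurrence max_connections out) := by unfold Spec_limit_cooccurrences; infer_instance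

-- ===== CLAIM (what is proved, stated in full; the proofs are below) =====
def Claim_equal_limit_cooccurrences : Prop := ∀ (cooccurrence : List (String × String × Int)) (max_connections : Int), Dom_limit_cooccurrences cooccurrence max_connections → Spec_limit_cooccurrences cooccurrence max_connections (limit_cooccurrences cooccurrence max_connections)

-- ===== LEMMAS AND PROOFS =====

-- grouping projection used only by the proofs
def pvF : String × PySem.Dict String Int → String × List (String × Int) := fun wc => (wc.1, wc.2.items)

theorem pv_take_insertBy {α : Type} (before : α → α → Bool) (x : α) :
    ∀ (l : List α) (k : Nat),
      (PySem.List.insertBy before x (l.take k)).take k = (PySem.List.insertBy before x l).take k := by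
  intro l
  induction l with
  | nil => intro k; simp
  | cons y ys ih =>
    intro k
    cases k with
    | zero => simp
    | succ n =>
      by_cases hb : before x y
      · simp only [List.take_succ_cons, PySem.List.insertBy, hb, if_true]
        congr 1
        cases n with
        | zero => simp
        | succ m =>
          have h : min m (m + 1) = m := by omega
          simp [List.take_take]
      · simp only [List.take_succ_cons, PySem.List.insertBy, hb, if_false, Bool.false_eq_true]
        rw [ih n]

theorem pv_foldl_insertBy_take {α : Type} (before : α → α → Bool) (k : Nat) :
    ∀ (L acc : List α),
      L.foldl (fun top it => (PySem.List.insertBy before it top).take k) (acc.take k)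
        = (L.foldl (fun top it => PySem.List.insertBy before it top) acc).take k := by
  intro L
  induction L with
  | nil => intro acc; rfl
  | cons x xs ih =>
    intro acc
    simp only [List.foldl_cons]
    rw [pv_take_insertBy, ← ih (PySem.List.insertBy before x acc)]

theorem pv_foldl_slice_neg {α : Type} (bf : α → α → Bool) {m : Int} (hm : m < 0) :
    ∀ (L : List α),
      L.foldl (fun top it => PySem.List.slice (PySem.List.insertBy bf it top) none (some m)) [] = [] := by
  intro L
  induction L with
  | nil => rfl
  | cons x xs ih =>
    simp only [List.foldl_cons]
    have h1 : PySem.List.slice (PySem.List.insertBy bf x []) none (some m) = ([] : List α) := by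
      have hb : PySem.List.clampIdx 1 m = 0 := by
        simp only [PySem.List.clampIdx]
        split_ifs <;> omega
      simp [PySem.List.insertBy, PySem.List.slice, hb]
    rw [h1, ih]

theorem pv_items_ofList {κ ν : Type} [BEq κ] [LawfulBEq κ] (l : List (κ × ν))
    (h : (l.map Prod.fst).Nodup) : (PySem.Dict.ofList l).items = l := by
  have hfresh : ∀ a ∈ l, (PySem.Dict.empty : PySem.Dict κ ν).contains a.1 = false := by
    intro a _; rfl
  have h2 := PySem.Dict.items_foldl_insert_fresh l Prod.fst Prod.snd PySem.Dict.empty hfresh h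
  simpa [PySem.Dict.ofList, PySem.Dict.update, PySem.Dict.empty] using h2

theorem pv_get?_rel (d : PySem.Dict String (PySem.Dict String Int)) (g : PySem.Dict String (List (String × Int)))
    (h : d.items.map pvF = g.items) (w : String) :
    g.get? w = (d.get? w).map (fun c => c.items) := by
  simp only [PySem.Dict.get?, ← h, List.find?_map]
  cases hf : d.items.find? (fun p => p.1 == w) with
  | none =>
    have : d.items.find? ((fun p => p.1 == w) ∘ pvF) = none := by
      simpa [pvF, Function.comp] using hf
    simp [this]
  | some q =>
    have : d.items.find? ((fun p => p.1 == w) ∘ pvF) = some q := by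
      simpa [pvF, Function.comp] using hf
    simp [this, pvF]

theorem pv_getD_rel (d : PySem.Dict String (PySem.Dict String Int)) (g : PySem.Dict String (List (String × Int)))
    (h : d.items.map pvF = g.items) (w : String) :
    g.getD w [] = (d.getD w PySem.Dict.empty).items := by
  simp only [PySem.Dict.getD, pv_get?_rel d g h w]
  cases d.get? w <;> simp [PySem.Dict.empty]

theorem pv_contains_rel (d : PySem.Dict String (PySem.Dict String Int)) (g : PySem.Dict String (List (String × Int)))
    (h : d.items.map pvF = g.items) (w : String) :
    g.contains w = d.contains w := by
  simp only [PySem.Dict.contains, ← h, List.any_map]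
  rfl

theorem pv_stage1 :
    ∀ (l : List ((String × String) × Int)) (d : PySem.Dict String (PySem.Dict String Int))
      (g : PySem.Dict String (List (String × Int))),
      (l.map Prod.fst).Nodup →
      (∀ p ∈ l, ((d.getD p.1.1 PySem.Dict.empty).contains p.1.2) = false) →
      d.items.map pvF = g.items →
      (∀ wc ∈ d.items, wc.2.keys.Nodup) →
      ((l.foldl (fun d p => d.insert p.1.1 ((d.getD p.1.1 PySem.Dict.empty).insert p.1.2 p.2)) d).items.map pvF
         = (l.foldl (fun g p => g.modify p.1.1 [] (fun L => L ++ [(p.1.2, p.2)])) g).items)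
      ∧ (∀ wc ∈ (l.foldl (fun d p => d.insert p.1.1 ((d.getD p.1.1 PySem.Dict.empty).insert p.1.2 p.2)) d).items,
          wc.2.keys.Nodup) := by
  intro l
  induction l with
  | nil => intro d g _ _ h3 h4; exact ⟨h3, h4⟩
  | cons p rest ih =>
    intro d g h1 h2 h3 h4
    simp only [List.foldl_cons]
    have hpf : p.1 ∉ rest.map Prod.fst := by
      simp only [List.map_cons, List.nodup_cons] at h1; exact h1.1
    have h1' : (rest.map Prod.fst).Nodup := by
      simp only [List.map_cons, List.nodup_cons] at h1; exact h1.2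
    have hfreshp : ((d.getD p.1.1 PySem.Dict.empty).contains p.1.2) = false := h2 p (List.mem_cons_self ..)
    have hvitems : ((d.getD p.1.1 PySem.Dict.empty).insert p.1.2 p.2).items
        = (d.getD p.1.1 PySem.Dict.empty).items ++ [(p.1.2, p.2)] :=
      PySem.Dict.items_insert_of_not_contains _ _ hfreshp
    have hgd : g.getD p.1.1 [] = (d.getD p.1.1 PySem.Dict.empty).items := pv_getD_rel d g h3 p.1.1
    have hcon : g.contains p.1.1 = d.contains p.1.1 := pv_contains_rel d g h3 p.1.1
    -- the modify is an insert of the appended list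
    have hmod : g.modify p.1.1 [] (fun L => L ++ [(p.1.2, p.2)])
        = g.insert p.1.1 ((d.getD p.1.1 PySem.Dict.empty).items ++ [(p.1.2, p.2)]) := by
      simp [PySem.Dict.modify, hgd]
    rw [hmod]
    apply ih
    · exact h1'
    · -- freshness is preserved
      intro q hq
      by_cases he : q.1.1 = p.1.1
      · have hne : q.1.2 ≠ p.1.2 := by
          intro he2
          apply hpf
          have : q.1 = p.1 := Prod.ext he he2
          exact this ▸ List.mem_map_of_mem hq
        rw [he, PySem.Dict.getD_insert_self, PySem.Dict.contains_insert]
        have : (d.getD q.1.1 PySem.Dict.empty).contains q.1.2 = false := h2 q (List.mem_cons_of_mem _ hq)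
        rw [he] at this
        simp [this, hne]
      · rw [PySem.Dict.getD_insert_of_ne _ _ _ he]
        exact h2 q (List.mem_cons_of_mem _ hq)
    · -- the items lists stay related
      cases hdc : d.contains p.1.1
      · rw [PySem.Dict.items_insert_of_not_contains _ _ hdc,
            PySem.Dict.items_insert_of_not_contains _ _ (hcon.trans hdc)]
        rw [List.map_append, h3]
        simp [pvF, hvitems]
      · rw [PySem.Dict.items_insert_of_contains _ _ hdc,
            PySem.Dict.items_insert_of_contains _ _ (hcon.trans hdc)]
        rw [← h3, List.map_map, List.map_map]
        apply List.map_congr_left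
        intro q _
        by_cases hq1 : q.1 = p.1.1
        · simp [pvF, Function.comp, hq1, hvitems]
        · simp [pvF, Function.comp, hq1]
    · -- every value keeps distinct keys
      intro wc hwc
      rw [PySem.Dict.mem_items_insert] at hwc
      rcases hwc with hwc | ⟨hwc, _⟩
      · subst hwc
        apply PySem.Dict.nodup_keys_insert
        cases hq : d.get? p.1.1 with
        | none =>
          simp [PySem.Dict.getD, hq, PySem.Dict.empty, PySem.Dict.keys]
        | some c =>
          have : ∃ pr ∈ d.items, pr.2 = c := by
            simp only [PySem.Dict.get?, Option.map_eq_some_iff] at hq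
            obtain ⟨pr, hpr, hpr2⟩ := hq
            exact ⟨pr, List.mem_of_find?_eq_some hpr, hpr2⟩
          obtain ⟨pr, hpr, hpr2⟩ := this
          have := h4 pr hpr
          simp [PySem.Dict.getD, hq, ← hpr2, this]
      · exact h4 wc hwc

theorem pv_select (m : Int) (L : List (String × Int)) (hL : (L.map Prod.fst).Nodup) :
    (if m < (L.length : Int) then
       (PySem.Dict.ofList ((PySem.List.sorted L (fun x => x.2) true).take m.toNat)).items
     else L)
    = (if m < (L.length : Int) then
        L.foldl (fun top it =>
          PySem.List.slice (PySem.List.insertBy (fun a b => decide (b.2 < a.2)) it top) none (some m)) []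
       else L) := by
  by_cases hc : m < (L.length : Int)
  · simp only [hc, if_true]
    by_cases hm : 0 ≤ m
    · -- 'del top[max:]' is take, and the insertion loop is sorting
      have hslice : (fun (top : List (String × Int)) (it : String × Int) =>
            PySem.List.slice (PySem.List.insertBy (fun a b => decide (b.2 < a.2)) it top) none (some m))
          = fun top it => (PySem.List.insertBy (fun a b => decide (b.2 < a.2)) it top).take m.toNat := by
        funext top it
        exact PySem.List.slice_to _ hm
      rw [hslice]
      have hstart : ([] : List (String × Int)) = ([] : List (String × Int)).take m.toNat := by simp
      rw [hstart, pv_foldl_insertBy_take]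
      rw [← PySem.List.sorted_rev_eq_foldl_insertBy L (fun x => x.2)]
      apply pv_items_ofList
      have hperm := PySem.List.sorted_perm L (fun x => x.2) true
      have h1 : ((PySem.List.sorted L (fun x => x.2) true).map Prod.fst).Nodup :=
        ((hperm.map Prod.fst).nodup_iff).mpr hL
      rw [List.map_take]
      exact (List.take_sublist _ _).nodup h1
    · -- negative max_connections: both sides keep nothing
      have hm' : m < 0 := by omega
      rw [pv_foldl_slice_neg _ hm']
      have : m.toNat = 0 := by omega
      simp [this, PySem.Dict.ofList, PySem.Dict.update, PySem.Dict.empty]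
  · simp [hc]


theorem pv_main (c : List (String × String × Int)) (m : Int) :
    limit_cooccurrences c m = limit_cooccurrences_alt c m := by
  unfold limit_cooccurrences limit_cooccurrences_alt
  dsimp only
  set l := (PySem.Dict.ofList (c.map (fun t => ((t.1, t.2.1), t.2.2)))).items with hl
  have hk : (l.map Prod.fst).Nodup := by
    have h := PySem.Dict.nodup_keys_ofList (c.map (fun t => ((t.1, t.2.1), t.2.2)))
    simpa [PySem.Dict.keys] using h
  obtain ⟨hR, hV⟩ := pv_stage1 l PySem.Dict.empty PySem.Dict.empty hk
    (by intro p _; rfl) rfl (by intro wc hwc; simp [PySem.Dict.empty] at hwc)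
  congr 1
  congr 1
  rw [List.foldl_map, ← hR, List.foldl_map]
  apply PySem.List.foldl_congr_mem
  intro acc wc hwc
  have hsel := pv_select m wc.2.items (by
    have := hV wc hwc
    simpa [PySem.Dict.keys] using this)
  by_cases hc : m < ((wc.2.items.length : Nat) : Int)
  · have hcs : m < ((wc.2.size : Nat) : Int) := hc
    simp only [hc, if_true] at hsel
    simp only [pvF, PySem.Dict.size]
    simp only [hc, if_true]
    rw [hsel]
  · have hcs : ¬ m < ((wc.2.size : Nat) : Int) := hc
    simp only [hcs, if_false, pvF]
    simp only [hc, if_false]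

-- ===== VERDICT (by name: the statement is the Claim_ definition above) =====
theorem limit_cooccurrences_spec : Claim_equal_limit_cooccurrences := by
  intro cooccurrence max_connections _
  unfold Spec_limit_cooccurrences
  exact pv_main cooccurrence max_connections
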